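-- pv_equiv track=rewrite | github.com/daniel-reich/ubiquitous-fiesta | ecwE3tQK9Na8GJ9pN_17.py | little_big
-- ===== SOURCE A (Python) =====
-- def little_big(n):
--   if n == 1:
--     return 5
--   if n == 2:
--     return 100
--   current_position = 2
--   little_num = 5
--   big_num = 100
--   for i in range(2, n + 1):
--     little_num += 1
--     current_position += 1
--     if current_position == n:
--       return little_num
--     big_num *= 2
--     current_position += 1
--     if current_position == n:
--       return big_num
-- ===== SOURCE B (Python) =====
-- def little_big(n):
--     # Closed form: odd positions hold the counter 5,6,7,...; even positions hold 100,200,400,...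
--     if n % 2 == 1:
--         return 5 + (n - 1) // 2
--     return 100 * 2 ** ((n - 2) // 2)
-- ===== Notes on version B (the rewrite author's own statement) =====
-- stated objective: faster
-- what changed: Replaced the O(n) simulation loop by a closed form: 5+(n-1)//2 for odd n and 100*2**((n-2)//2) for even n (fast built-in pow).
-- outside the precondition, e.g. on little_big(0): A returns None, B returns 50.0
import Mathlib
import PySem

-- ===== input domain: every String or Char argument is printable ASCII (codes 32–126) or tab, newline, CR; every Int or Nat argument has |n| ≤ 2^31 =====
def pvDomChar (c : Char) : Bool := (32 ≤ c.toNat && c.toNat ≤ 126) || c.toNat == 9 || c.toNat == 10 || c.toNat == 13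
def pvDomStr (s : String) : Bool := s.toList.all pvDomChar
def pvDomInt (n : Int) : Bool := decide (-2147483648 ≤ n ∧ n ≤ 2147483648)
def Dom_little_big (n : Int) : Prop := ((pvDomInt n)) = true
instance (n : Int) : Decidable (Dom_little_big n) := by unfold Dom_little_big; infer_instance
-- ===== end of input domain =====

-- B replaces A's O(n) simulation loop by a closed form (5+(n-1)//2 for odd n, 100*2^((n-2)//2) for even n): asymptotically faster.


-- ===== PORT A =====
-- the 'for i in range(2, n+1)' loop body; falls off the end (Python returns None) when the list runs out
def littleBigGo : List Int → Int → Int → Int → Int → Option Int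
  | [], _, _, _, _ => none
  | _ :: rest, n, pos, little, big =>
    let little := little + 1
    let pos := pos + 1
    if pos = n then some little
    else
      let big := big * 2
      let pos := pos + 1
      if pos = n then some big
      else littleBigGo rest n pos little big

def little_big (n : Int) : Int :=
  if n = 1 then 5
  else if n = 2 then 100
  else (littleBigGo (PySem.List.pyRange 2 (n + 1) 1) n 2 5 100).getD 0  -- none only outside Pre_

-- ===== PORT B =====
def little_big_alt (n : Int) : Int :=
  if PySem.Int.mod n 2 = 1 then 5 + PySem.Int.floordiv (n - 1) 2
  else 100 * 2 ^ (PySem.Int.floordiv (n - 2) 2).toNat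

-- ===== PRECONDITION & SPEC =====
-- Pre_ excludes n ≤ 0, where Python A falls off the loop and returns None (no int value).
def Pre_little_big (n : Int) : Prop := 1 ≤ n
instance (n : Int) : Decidable (Pre_little_big n) := by unfold Pre_little_big; infer_instance
def pvWitness_little_big : Int := 7
def Spec_little_big (n : Int) (out : Int) : Prop := out = little_big_alt n
instance (n : Int) (out : Int) : Decidable (Spec_little_big n out) := by unfold Spec_little_big; infer_instance

-- ===== CLAIM (what is proved, stated in full; the proofs are below) =====
def Claim_equal_little_big : Prop := ∀ (n : Int), Dom_little_big n → Pre_little_big n → Spec_little_big n (little_big n)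

-- ===== LEMMAS AND PROOFS =====

-- characterisation of the loop: starting at position pos with counters little/big, with enough fuel,
-- it returns little + k at position pos+2k-1 and big * 2^k at position pos+2k.
lemma littleBigGo_spec (fuel : List Int) : ∀ (n pos little big : Int),
    pos < n → n ≤ pos + 2 * fuel.length →
    littleBigGo fuel n pos little big =
      some (if (n - pos) % 2 = 1 then little + (n - pos + 1) / 2
            else big * 2 ^ ((n - pos) / 2).toNat) := by
  induction fuel with
  | nil => intro n pos little big h1 h2; simp at h2; omega
  | cons x rest ih =>
    intro n pos little big h1 h2
    simp only [littleBigGo]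
    by_cases hA : pos + 1 = n
    · rw [if_pos hA]
      have : (n - pos) % 2 = 1 ∧ (n - pos + 1) / 2 = 1 := by omega
      rw [if_pos this.1, this.2]
    · rw [if_neg hA]
      by_cases hB : pos + 1 + 1 = n
      · rw [if_pos hB]
        have h2' : (n - pos) % 2 ≠ 1 := by omega
        have h3 : ((n - pos) / 2).toNat = 1 := by omega
        rw [if_neg h2', h3]; ring_nf
      · rw [if_neg hB]
        rw [ih n (pos + 1 + 1) (little + 1) (big * 2) (by omega) (by simp at h2 ⊢; omega)]
        congr 1
        have hm : (n - (pos + 1 + 1)) % 2 = (n - pos) % 2 := by omega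
        by_cases hodd : (n - pos) % 2 = 1
        · rw [if_pos (hm ▸ hodd), if_pos hodd]
          have : (n - (pos + 1 + 1) + 1) / 2 = (n - pos + 1) / 2 - 1 := by omega
          rw [this]; ring
        · rw [if_neg (hm ▸ hodd), if_neg hodd]
          have h4 : ((n - pos) / 2).toNat = ((n - (pos + 1 + 1)) / 2).toNat + 1 := by omega
          rw [h4, pow_succ]; ring

lemma little_big_alt_closed (n : Int) :
    little_big_alt n = if (n - 2) % 2 = 1 then 5 + (n - 2 + 1) / 2
                       else 100 * 2 ^ ((n - 2) / 2).toNat := by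
  unfold little_big_alt
  rw [PySem.Int.mod_eq_emod_of_pos (by omega : (0:Int) < 2),
      PySem.Int.floordiv_eq_ediv_of_pos (by omega : (0:Int) < 2),
      PySem.Int.floordiv_eq_ediv_of_pos (by omega : (0:Int) < 2)]
  have hm : n % 2 = 1 ↔ (n - 2) % 2 = 1 := by omega
  by_cases h : (n - 2) % 2 = 1
  · rw [if_pos (hm.mpr h), if_pos h]
    congr 1; omega
  · rw [if_neg (fun hh => h (hm.mp hh)), if_neg h]

-- ===== VERDICT (by name: the statement is the Claim_ definition above) =====
theorem little_big_spec : Claim_equal_little_big := by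
  intro n _ hpre
  unfold Spec_little_big little_big
  by_cases h1 : n = 1
  · subst h1; decide
  · by_cases h2 : n = 2
    · subst h2; decide
    · rw [if_neg h1, if_neg h2]
      have hn3 : 3 ≤ n := by unfold Pre_little_big at hpre; omega
      have hlen : (PySem.List.pyRange 2 (n + 1) 1).length = (n - 1).toNat := by
        rw [PySem.List.length_pyRange_one]; omega
      rw [littleBigGo_spec _ n 2 5 100 (by omega) (by rw [hlen]; omega)]
      rw [little_big_alt_closed n]
      rfl
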